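-- pv_equiv track=rewrite | github.com/dudosyka-vkr/tracker-module | eyetracker/core/roi.py | _count_revisits
-- ===== SOURCE A (Python) =====
-- def _count_revisits(sequence: list[str | None]) -> dict[str, int]:
--     """Count per-AOI revisits from a fixation→AOI label sequence.
--
--     A revisit is recorded each time gaze returns to an AOI after having left
--     it (continuous runs in the same AOI count as a single visit).
--     """
--     revisits: dict[str, int] = {}
--     seen: set[str] = set()
--     prev: str | None = object()  # sentinel — never equal to any real label  # type: ignore[assignment]
--     for label in sequence:
--         if label == prev:
--             continue  # same AOI as previous fixation, still the same visit
--         prev = label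
--         if label is None:
--             continue
--         if label in seen:
--             revisits[label] = revisits.get(label, 0) + 1
--         else:
--             seen.add(label)
--             revisits[label] = 0
--     return revisits
-- ===== SOURCE B (Python) =====
-- def _count_revisits(sequence):
--     # Run-length-encode the sequence (one entry per maximal run), then count
--     # visits per AOI among the non-None run labels and subtract one.
--     runs = []
--     for label in sequence:
--         if not runs or runs[-1] != label:
--             runs.append(label)
--     visits = {}
--     for label in runs:
--         if label is not None:
--             visits[label] = visits.get(label, 0) + 1
--     return {label: count - 1 for label, count in visits.items()}
-- ===== Notes on version B (the rewrite author's own statement) =====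
-- stated objective: idiomatic
-- what changed: Replaces the fused single-pass loop with its seen-set and prev-sentinel by three plain passes: run-length-encode the sequence, tally the non-None run labels into a visit counter, and derive revisits as count-1 in a dict comprehension.
import Mathlib
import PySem

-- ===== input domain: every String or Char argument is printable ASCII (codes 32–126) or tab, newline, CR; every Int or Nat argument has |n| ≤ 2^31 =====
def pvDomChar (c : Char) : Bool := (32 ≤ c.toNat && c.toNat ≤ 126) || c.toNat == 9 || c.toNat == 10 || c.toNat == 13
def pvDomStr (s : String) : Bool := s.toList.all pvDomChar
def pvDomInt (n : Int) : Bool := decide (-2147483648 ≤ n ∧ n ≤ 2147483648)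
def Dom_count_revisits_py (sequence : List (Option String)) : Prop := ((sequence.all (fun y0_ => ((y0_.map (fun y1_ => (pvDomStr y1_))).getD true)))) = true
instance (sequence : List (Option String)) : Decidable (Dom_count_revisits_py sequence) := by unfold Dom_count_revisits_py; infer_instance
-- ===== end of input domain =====

-- B replaces A's fused single pass (seen-set + prev sentinel) by three plain passes:
-- run-length-encode, count non-None run labels, subtract one per label (idiomatic decomposition).

-- ===== PORT A =====
-- loop body of A; state = (revisits dict, seen set, prev); prev starts as `none`,
-- modelling the sentinel object() (never equal to any label), and is `some label` after
-- the first iteration.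
def stepA (st : PySem.Dict String Int × PySem.Set String × Option (Option String))
    (label : Option String) :
    PySem.Dict String Int × PySem.Set String × Option (Option String) :=
  if st.2.2 = some label then st
  else
    match label with
    | none => (st.1, st.2.1, some label)
    | some l =>
      if PySem.Set.contains st.2.1 l then
        (st.1.insert l (st.1.getD l 0 + 1), st.2.1, some label)
      else
        (st.1.insert l 0, PySem.Set.add st.2.1 l, some label)

def count_revisits_py (sequence : List (Option String)) : List (String × Int) :=
  (sequence.foldl stepA (PySem.Dict.empty, PySem.Set.empty, none)).1.items

-- ===== PORT B =====
-- first pass of B: run-length-encode ('if not runs or runs[-1] != label: runs.append(label)')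
def stepRuns (runs : List (Option String)) (label : Option String) : List (Option String) :=
  if runs.isEmpty || runs.getLast? != some label then runs ++ [label] else runs

-- second pass of B: tally non-None run labels
def stepCount (d : PySem.Dict String Int) (label : Option String) : PySem.Dict String Int :=
  match label with
  | none => d
  | some l => d.insert l (d.getD l 0 + 1)

def count_revisits_py_alt (sequence : List (Option String)) : List (String × Int) :=
  let runs := sequence.foldl stepRuns []
  let visits := runs.foldl stepCount PySem.Dict.empty
  -- dict comprehension {label: count - 1 for label, count in visits.items()}
  (visits.items.foldl
    (fun (d : PySem.Dict String Int) p => d.insert p.1 (p.2 - 1)) PySem.Dict.empty).items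

-- ===== PRECONDITION & SPEC =====
def Spec_count_revisits_py (sequence : List (Option String)) (out : List (String × Int)) : Prop := out = count_revisits_py_alt sequence
instance (sequence : List (Option String)) (out : List (String × Int)) : Decidable (Spec_count_revisits_py sequence out) := by unfold Spec_count_revisits_py; infer_instance

-- ===== CLAIM (what is proved, stated in full; the proofs are below) =====
def Claim_equal_count_revisits_py : Prop := ∀ (sequence : List (Option String)), Dom_count_revisits_py sequence → Spec_count_revisits_py sequence (count_revisits_py sequence)

-- ===== LEMMAS AND PROOFS =====

-- maximal-run labels of the sequence, given the previous label (none = sentinel)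
def runsOf : Option (Option String) → List (Option String) → List (Option String)
  | _, [] => []
  | p, x :: xs => if p = some x then runsOf p xs else x :: runsOf (some x) xs

-- A's inner work on a non-skipped label, prev dropped
def gSome (st : PySem.Dict String Int × PySem.Set String) (l : String) :
    PySem.Dict String Int × PySem.Set String :=
  if PySem.Set.contains st.2 l then
    (st.1.insert l (st.1.getD l 0 + 1), st.2)
  else
    (st.1.insert l 0, PySem.Set.add st.2 l)

-- B's run-length fold computes runsOf
lemma foldRuns_eq (xs : List (Option String)) : ∀ (acc : List (Option String)),
    xs.foldl stepRuns acc = acc ++ runsOf acc.getLast? xs := by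
  induction xs with
  | nil => intro acc; simp [runsOf]
  | cons x xs ih =>
    intro acc
    by_cases h : acc.getLast? = some x
    · have hne : acc ≠ [] := by intro he; simp [he] at h
      simp [List.foldl, stepRuns, h, List.isEmpty_eq_false_iff.mpr hne, runsOf, ih]
    · have hcond : (acc.isEmpty || acc.getLast? != some x) = true := by
        cases acc with
        | nil => simp
        | cons a t => simpa using h
      simp only [List.foldl, stepRuns, hcond, ite_true]
      rw [ih, List.getLast?_concat]
      simp [runsOf, h]

-- A's fold, projected to (dict, seen), is gSome over the run labels
lemma foldA_eq (xs : List (Option String)) : ∀ (p : Option (Option String))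
    (st : PySem.Dict String Int × PySem.Set String),
    ((xs.foldl stepA (st.1, st.2, p)).1, (xs.foldl stepA (st.1, st.2, p)).2.1)
      = (runsOf p xs).foldl
          (fun st (label : Option String) =>
            match label with | none => st | some l => gSome st l) st := by
  induction xs with
  | nil => intro p st; simp [runsOf]
  | cons x xs ih =>
    intro p st
    by_cases h : p = some x
    · simp [List.foldl, stepA, h, runsOf, ih]
    · cases x with
      | none =>
        simp only [List.foldl, runsOf, h, ite_false, stepA]
        exact ih (some none) st
      | some l =>
        have hstep : stepA (st.1, st.2, p) (some l)
            = ((gSome st l).1, (gSome st l).2, some (some l)) := by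
          simp only [stepA, gSome, h, ite_false]
          by_cases hc : l ∈ st.2 <;> simp [hc]
        simp only [List.foldl, runsOf, h, ite_false]
        rw [hstep]
        exact ih (some (some l)) (gSome st l)

-- a fold that skips none is a fold over filterMap id (stated for both ports' steps)
lemma foldSkip_gSome (ys : List (Option String)) :
    ∀ (st : PySem.Dict String Int × PySem.Set String),
    ys.foldl (fun st (label : Option String) =>
        match label with | none => st | some l => gSome st l) st
      = (ys.filterMap id).foldl gSome st := by
  induction ys with
  | nil => intro st; simp
  | cons y ys ih => intro st; cases y <;> simp [List.foldl, ih]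

lemma foldSkip_count (ys : List (Option String)) :
    ∀ (d : PySem.Dict String Int),
    ys.foldl stepCount d
      = (ys.filterMap id).foldl (fun d l => d.insert l (d.getD l 0 + 1)) d := by
  induction ys with
  | nil => intro d; simp
  | cons y ys ih => intro d; cases y <;> simp [List.foldl, stepCount, ih]

-- main invariant of A's counting fold: keys are the distinct labels, and each value is
-- (old value + #occurrences) for an old key, (#occurrences - 1) for a fresh key
lemma countLem (ls : List String) : ∀ (d : PySem.Dict String Int), d.keys.Nodup →
    (ls.foldl gSome (d, d.keys)).1.keys = PySem.Set.update d.keys ls ∧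
    (ls.foldl gSome (d, d.keys)).1.keys.Nodup ∧
    (∀ k, (d.contains k = true →
        (ls.foldl gSome (d, d.keys)).1.getD k 0 = d.getD k 0 + (ls.count k : Int)) ∧
      (d.contains k = false → k ∈ ls →
        (ls.foldl gSome (d, d.keys)).1.getD k 0 = (ls.count k : Int) - 1)) := by
  induction ls with
  | nil =>
    intro d hnd
    refine ⟨rfl, hnd, fun k => ⟨fun _ => by simp, fun _ hk => by simp at hk⟩⟩
  | cons x ls ih =>
    intro d hnd
    by_cases hm : x ∈ d.keys
    · have hc : d.contains x = true := (PySem.Dict.contains_iff_mem_keys d x).mpr hm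
      have hkeys : (d.insert x (d.getD x 0 + 1)).keys = d.keys :=
        PySem.Dict.keys_insert_of_contains d _ hc
      have hstep : gSome (d, d.keys) x
          = (d.insert x (d.getD x 0 + 1), (d.insert x (d.getD x 0 + 1)).keys) := by
        simp [gSome, PySem.Set.contains, hm, hkeys]
      obtain ⟨h1, h2, h3⟩ := ih (d.insert x (d.getD x 0 + 1)) (by rw [hkeys]; exact hnd)
      have hupd : PySem.Set.update d.keys (x :: ls)
          = PySem.Set.update (d.insert x (d.getD x 0 + 1)).keys ls := by
        have ha : PySem.Set.add (d.keys : List String) x = d.keys := by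
          simp [PySem.Set.add, PySem.Set.contains, hm]
        simp [PySem.Set.update, List.foldl, ha, hkeys]
      refine ⟨by rw [List.foldl, hstep, h1, hupd], by rw [List.foldl, hstep]; exact h2, ?_⟩
      intro k
      constructor
      · intro hk
        have hk' : (d.insert x (d.getD x 0 + 1)).contains k = true := by
          simp [PySem.Dict.contains_insert, hk]
        have hg := (h3 k).1 hk'
        rw [List.foldl, hstep, hg, PySem.Dict.getD_insert]
        by_cases hkx : k = x
        · subst hkx; simp; ring
        · simp [hkx, Ne.symm hkx]
      · intro hk hmem
        have hkx : k ≠ x := by intro he; rw [he] at hk; rw [hk] at hc; simp at hc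
        have hk' : (d.insert x (d.getD x 0 + 1)).contains k = false := by
          simp [PySem.Dict.contains_insert, hk, hkx]
        have hmem' : k ∈ ls := by
          rcases List.mem_cons.mp hmem with h | h
          · exact absurd h hkx
          · exact h
        have hg := (h3 k).2 hk' hmem'
        rw [List.foldl, hstep, hg]
        simp [Ne.symm hkx]
    · have hc' : d.contains x = false := by
        rw [← Bool.not_eq_true]
        exact fun hcc => hm ((PySem.Dict.contains_iff_mem_keys d x).mp hcc)
      have hkeys : (d.insert x 0).keys = d.keys ++ [x] :=
        PySem.Dict.keys_insert_of_not_contains d _ hc'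
      have hadd : PySem.Set.add (d.keys : List String) x = (d.insert x 0).keys := by
        simp [PySem.Set.add, PySem.Set.contains, hm, hkeys]
      have hstep : gSome (d, d.keys) x = (d.insert x 0, (d.insert x 0).keys) := by
        simp [gSome, PySem.Set.contains, hm, hkeys]
      have hnd' : (d.insert x 0).keys.Nodup := by
        rw [hkeys]
        have hdisj : (d.keys : List String).Disjoint [x] := by
          intro a ha hax
          simp only [List.mem_singleton] at hax
          exact hm (hax ▸ ha)
        simp only [List.nodup_append, List.nodup_singleton, true_and]
        refine ⟨hnd, fun a ha b hb => ?_⟩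
        simp only [List.mem_singleton] at hb
        subst hb
        intro he
        rw [he] at ha
        exact hm ha
      obtain ⟨h1, h2, h3⟩ := ih (d.insert x 0) hnd'
      have hupd : PySem.Set.update d.keys (x :: ls)
          = PySem.Set.update (d.insert x 0).keys ls := by
        simp [PySem.Set.update, List.foldl, hadd]
      refine ⟨by rw [List.foldl, hstep, h1, hupd], by rw [List.foldl, hstep]; exact h2, ?_⟩
      intro k
      constructor
      · intro hk
        have hkx : k ≠ x := by intro he; rw [he] at hk; rw [hk] at hc'; simp at hc'
        have hk' : (d.insert x 0).contains k = true := by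
          simp [PySem.Dict.contains_insert, hk]
        have hg := (h3 k).1 hk'
        rw [List.foldl, hstep, hg, PySem.Dict.getD_insert]
        simp [hkx, Ne.symm hkx]
      · intro _ hmem
        by_cases hkx : k = x
        · subst hkx
          have hk' : (d.insert k 0).contains k = true := by
            simp
          have hg := (h3 k).1 hk'
          rw [List.foldl, hstep, hg, PySem.Dict.getD_insert]
          simp
        · have hk2 : d.contains k = false := by
            rw [← Bool.not_eq_true]
            intro hcc
            -- k ∈ d.keys would make hk' below inconsistent; we only need hc'-style reasoning
            exact hkx (by
              have := (PySem.Dict.contains_iff_mem_keys d k).mp hcc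
              exact absurd this (by simp_all))
          have hk' : (d.insert x 0).contains k = false := by
            simp [PySem.Dict.contains_insert, hk2, hkx]
          have hmem' : k ∈ ls := by
            rcases List.mem_cons.mp hmem with h | h
            · exact absurd h hkx
            · exact h
          have hg := (h3 k).2 hk' hmem'
          rw [List.foldl, hstep, hg]
          simp [Ne.symm hkx]

-- ===== VERDICT (by name: the statement is the Claim_ definition above) =====
theorem count_revisits_py_spec : Claim_equal_count_revisits_py := by
  intro sequence _
  unfold Spec_count_revisits_py count_revisits_py count_revisits_py_alt
  set R : List String := (runsOf none sequence).filterMap id with hR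
  -- A's side
  have hA : (sequence.foldl stepA (PySem.Dict.empty, PySem.Set.empty, none)).1
      = (R.foldl gSome ((PySem.Dict.empty : PySem.Dict String Int),
          (PySem.Dict.empty : PySem.Dict String Int).keys)).1 := by
    have h := foldA_eq sequence none ((PySem.Dict.empty : PySem.Dict String Int),
      (PySem.Set.empty : PySem.Set String))
    have h1 := congrArg Prod.fst h
    simp only at h1
    rw [h1, foldSkip_gSome]
    rfl
  obtain ⟨hk, hknd, hv⟩ := countLem R PySem.Dict.empty (by simp)
  have hAitems : (sequence.foldl stepA (PySem.Dict.empty, PySem.Set.empty, none)).1.items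
      = (PySem.Set.ofList R).map (fun k => (k, (R.count k : Int) - 1)) := by
    rw [hA, PySem.Dict.items_eq_map_keys _ hknd 0, hk]
    have hupd : PySem.Set.update ((PySem.Dict.empty : PySem.Dict String Int).keys) R
        = PySem.Set.ofList R := rfl
    rw [hupd]
    apply List.map_congr_left
    intro k hkmem
    have hkR : k ∈ R := by simpa [PySem.Set.mem_ofList] using hkmem
    have hg := (hv k).2 (by simp) hkR
    rw [hg]
  -- B's side
  have hruns : sequence.foldl stepRuns [] = runsOf none sequence := by
    simpa using foldRuns_eq sequence []
  have hvisits : (sequence.foldl stepRuns []).foldl stepCount PySem.Dict.empty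
      = PySem.Dict.counter R := by
    rw [hruns, foldSkip_count, ← hR, PySem.Dict.foldl_insert_getD_add_one_eq_counter]
  have hBitems :
      ((((sequence.foldl stepRuns []).foldl stepCount PySem.Dict.empty).items).foldl
        (fun (d : PySem.Dict String Int) p => d.insert p.1 (p.2 - 1)) PySem.Dict.empty).items
      = (PySem.Set.ofList R).map (fun k => (k, (R.count k : Int) - 1)) := by
    rw [hvisits]
    have hfresh : ∀ p ∈ (PySem.Dict.counter R : PySem.Dict String Int).items,
        (PySem.Dict.empty : PySem.Dict String Int).contains p.1 = false := by
      intro p _; simp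
    have hndk : (((PySem.Dict.counter R : PySem.Dict String Int).items).map Prod.fst).Nodup := by
      have : ((PySem.Dict.counter R : PySem.Dict String Int).items).map Prod.fst
          = (PySem.Dict.counter R : PySem.Dict String Int).keys := rfl
      rw [this]; exact PySem.Dict.nodup_keys_counter R
    rw [PySem.Dict.items_foldl_insert_fresh (k := Prod.fst) (v := fun p => p.2 - 1) _ _ hfresh hndk]
    rw [PySem.Dict.items_counter]
    simp [List.map_map, Function.comp_def, show (PySem.Dict.empty : PySem.Dict String Int).items = [] from rfl]
  simp only [hAitems, hBitems]
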